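-- pv_equiv track=rewrite | github.com/AstraeLabs/StreamingCommunity | VibraVid/core/downloader/dash.py | _filter_subtitles
-- ===== SOURCE A (Python) =====
-- def _filter_subtitles(sub_list: list, filter_str: str) -> list:
--     """
--     Filter subtitle list based on the filter string. The filter string can be:
--     """
--     if not sub_list:
--         return []
--     if not filter_str or filter_str.lower() in ("false",):
--         return []
--     if filter_str.lower() == "all":
--         return sub_list
--
--     wanted_locales = set()
--     for token in filter_str.replace("|", ",").split(","):
--         token = token.strip()
--         if not token:
--             continue
--         wanted_locales.add(token.lower())
--
--     if not wanted_locales: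
--         return sub_list
--
--     filtered = []
--     for s in sub_list:
--         lang_resolved = (s.get("language_resolved") or "").strip().lower()
--         lang = (s.get("language") or "").strip().lower()
--
--         # Check exact match first
--         if lang_resolved in wanted_locales or lang in wanted_locales:
--             filtered.append(s)
--             continue
--
--         # Check prefix match (e.g., 'it' matches 'it-it', 'ita' matches 'it-any')
--         for token in wanted_locales:
--             if lang_resolved.startswith(token + "-") or lang_resolved == token:
--                 filtered.append(s)
--                 break
--             if lang.startswith(token + "-") or lang == token:
--                 filtered.append(s)
--                 break
--
--     return filtered
-- ===== SOURCE B (Python) =====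
-- def _filter_subtitles(sub_list: list, filter_str: str) -> list:
--     """Same filtering, but the inner token loop with startswith is replaced by
--     generating each language's candidate keys (the full string plus every prefix
--     ending right before a '-') and testing set membership directly."""
--     if not sub_list:
--         return []
--     if not filter_str or filter_str.lower() in ("false",):
--         return []
--     if filter_str.lower() == "all":
--         return sub_list
--
--     wanted_locales = set()
--     for token in filter_str.replace("|", ",").split(","):
--         token = token.strip()
--         if not token:
--             continue
--         wanted_locales.add(token.lower())
--
--     if not wanted_locales:
--         return sub_list
--
--     def keys(lang):
--         ks = {lang}
--         for i, ch in enumerate(lang):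
--             if ch == "-":
--                 ks.add(lang[:i])
--         return ks
--
--     def wants(s):
--         lang_resolved = (s.get("language_resolved") or "").strip().lower()
--         lang = (s.get("language") or "").strip().lower()
--         return any(k in wanted_locales for k in keys(lang_resolved) | keys(lang))
--
--     return [s for s in sub_list if wants(s)]
-- ===== Notes on version B (the rewrite author's own statement) =====
-- stated objective: alternative
-- what changed: The per-subtitle inner loop over all wanted tokens with startswith tests is replaced by generating each language's candidate keys (the string itself plus every prefix ending right before a '-') and testing them by direct set membership; guards and token-set construction are unchanged.
import Mathlib
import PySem

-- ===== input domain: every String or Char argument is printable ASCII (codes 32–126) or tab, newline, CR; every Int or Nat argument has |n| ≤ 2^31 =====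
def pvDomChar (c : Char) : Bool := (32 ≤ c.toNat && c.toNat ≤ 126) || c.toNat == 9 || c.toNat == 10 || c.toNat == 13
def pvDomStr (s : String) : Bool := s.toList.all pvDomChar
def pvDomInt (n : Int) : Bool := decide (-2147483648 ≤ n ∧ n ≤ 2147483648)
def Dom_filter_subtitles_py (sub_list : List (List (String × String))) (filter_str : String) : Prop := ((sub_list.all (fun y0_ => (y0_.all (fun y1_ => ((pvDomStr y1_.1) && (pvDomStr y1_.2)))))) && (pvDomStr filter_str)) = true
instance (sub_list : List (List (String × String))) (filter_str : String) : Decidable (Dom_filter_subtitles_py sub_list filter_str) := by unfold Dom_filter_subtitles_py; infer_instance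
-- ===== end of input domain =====

-- B replaces A's per-subtitle loop over all wanted tokens (startswith tests) by prefix-key
-- generation plus direct set membership; an alternative of similar cost, proved equal everywhere.

-- ===== PORT A =====
-- (s.get(k) or "") : the only falsy str is "", so Dict.get? with default "" is exact
def pvNormLang (s : List (String × String)) (k : String) : List Char :=
  PySem.Chars.lower (PySem.Chars.strip ((PySem.Dict.get? ⟨s⟩ k).getD "").toList)

-- shared by both ports: the wanted-locale set construction (identical code in Source A and Source B)
def pvWanted (filter_str : List Char) : PySem.Set (List Char) :=
  (PySem.Chars.splitOn (PySem.Chars.replace filter_str "|".toList ",".toList) ",".toList).foldl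
    (fun w token =>
      let t := PySem.Chars.strip token
      if t = [] then w else PySem.Set.add w (PySem.Chars.lower t))
    PySem.Set.empty

-- A's inner 'for token in wanted_locales: … break' (append decision is order-independent)
def pvLoopA (tokens : List (List Char)) (lr lg : List Char) : Bool :=
  match tokens with
  | [] => false
  | t :: rest =>
    if PySem.Chars.startswith lr (t ++ ['-']) || lr == t then true
    else if PySem.Chars.startswith lg (t ++ ['-']) || lg == t then true
    else pvLoopA rest lr lg

def filter_subtitles_py (sub_list : List (List (String × String))) (filter_str : String) : List (List (String × String)) :=
  if sub_list = [] then []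
  else if filter_str.toList = [] || PySem.Chars.lower filter_str.toList == "false".toList then []
  else if PySem.Chars.lower filter_str.toList == "all".toList then sub_list
  else
    let wanted := pvWanted filter_str.toList
    if wanted = [] then sub_list
    else
      sub_list.foldl (fun acc s =>
        let lr := pvNormLang s "language_resolved"
        let lg := pvNormLang s "language"
        if PySem.Set.contains wanted lr || PySem.Set.contains wanted lg then acc ++ [s]
        else if pvLoopA wanted lr lg then acc ++ [s]
        else acc) []

-- ===== PORT B =====
-- keys(lang): {lang} plus lang[:i] for every i with lang[i] == '-'  (i ≥ 0, so take is exact for the slice)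
def pvKeysB (l : List Char) : PySem.Set (List Char) :=
  (PySem.List.enumerate l).foldl
    (fun ks p => if p.2 == '-' then PySem.Set.add ks (l.take p.1.toNat) else ks)
    (PySem.Set.ofList [l])

def pvWantsB (wanted : PySem.Set (List Char)) (s : List (String × String)) : Bool :=
  let lr := pvNormLang s "language_resolved"
  let lg := pvNormLang s "language"
  (PySem.Set.union (pvKeysB lr) (pvKeysB lg)).any (fun k => PySem.Set.contains wanted k)

def filter_subtitles_py_alt (sub_list : List (List (String × String))) (filter_str : String) : List (List (String × String)) :=
  if sub_list = [] then []
  else if filter_str.toList = [] || PySem.Chars.lower filter_str.toList == "false".toList then []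
  else if PySem.Chars.lower filter_str.toList == "all".toList then sub_list
  else
    let wanted := pvWanted filter_str.toList
    if wanted = [] then sub_list
    else sub_list.filter (fun s => pvWantsB wanted s)

-- ===== PRECONDITION & SPEC =====
def Spec_filter_subtitles_py (sub_list : List (List (String × String))) (filter_str : String) (out : List (List (String × String))) : Prop := out = filter_subtitles_py_alt sub_list filter_str
instance (sub_list : List (List (String × String))) (filter_str : String) (out : List (List (String × String))) : Decidable (Spec_filter_subtitles_py sub_list filter_str out) := by unfold Spec_filter_subtitles_py; infer_instance

-- ===== CLAIM (what is proved, stated in full; the proofs are below) =====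
def Claim_equal_filter_subtitles_py : Prop := ∀ (sub_list : List (List (String × String))) (filter_str : String), Dom_filter_subtitles_py sub_list filter_str → Spec_filter_subtitles_py sub_list filter_str (filter_subtitles_py sub_list filter_str)

-- ===== LEMMAS AND PROOFS =====

-- A's inner loop is the existence of a matching token
theorem pvLoopA_eq_any (tokens : List (List Char)) (lr lg : List Char) :
    pvLoopA tokens lr lg
      = tokens.any (fun t =>
          (PySem.Chars.startswith lr (t ++ ['-']) || lr == t)
          || (PySem.Chars.startswith lg (t ++ ['-']) || lg == t)) := by
  induction tokens with
  | nil => rfl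
  | cons t rest ih =>
    simp only [pvLoopA, List.any_cons]
    by_cases h1 : PySem.Chars.startswith lr (t ++ ['-']) || lr == t
    · simp [h1]
    · by_cases h2 : PySem.Chars.startswith lg (t ++ ['-']) || lg == t
      · simp [h1, h2]
      · simp [h1, h2, ih]

-- membership in a foldl of conditional Set.add
theorem mem_foldl_add_if {α : Type} (c : α → Bool) (f : α → List Char)
    (xs : List α) (init : PySem.Set (List Char)) (k : List Char) :
    k ∈ xs.foldl (fun ks x => if c x then PySem.Set.add ks (f x) else ks) init
      ↔ k ∈ init ∨ ∃ x ∈ xs, c x ∧ k = f x := by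
  induction xs generalizing init with
  | nil => simp
  | cons x xs ih =>
    simp only [List.foldl_cons, ih]
    by_cases h : c x <;> simp [h, PySem.Set.mem_add]
    tauto

-- an index of a '-' in l is exactly a '<prefix>-' prefix of l
theorem prefix_dash_iff (l k : List Char) :
    (∃ (i : Nat) (h : i < l.length), l[i] = '-' ∧ k = l.take i) ↔ (k ++ ['-']) <+: l := by
  constructor
  · rintro ⟨i, h, hdash, rfl⟩
    refine ⟨l.drop (i + 1), ?_⟩
    calc l.take i ++ ['-'] ++ l.drop (i + 1)
        = l.take i ++ (l[i] :: l.drop (i + 1)) := by simp [hdash]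
      _ = l.take i ++ l.drop i := by rw [List.drop_eq_getElem_cons h]
      _ = l := List.take_append_drop i l
  · rintro ⟨rest, hr⟩
    have hl : l = k ++ '-' :: rest := by rw [← hr]; simp
    subst hl
    refine ⟨k.length, by simp, ?_, ?_⟩
    · rw [List.getElem_append_right (le_refl k.length)]
      simp
    · simp

-- characterisation of B's candidate keys
theorem mem_pvKeysB (l k : List Char) :
    k ∈ pvKeysB l ↔ k = l ∨ (k ++ ['-']) <+: l := by
  unfold pvKeysB
  rw [mem_foldl_add_if]
  simp only [PySem.Set.mem_ofList, List.mem_singleton]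
  rw [← prefix_dash_iff l k]
  constructor
  · rintro (h | ⟨p, hp, hc, rfl⟩)
    · exact Or.inl h
    · obtain ⟨j, hj, rfl⟩ := ((PySem.List.mem_enumerate_iff _ _ _).mp hp)
      exact Or.inr ⟨j, hj, by simpa using hc, by simp⟩
  · rintro (h | ⟨i, h, hdash, rfl⟩)
    · exact Or.inl h
    · refine Or.inr ⟨((0 : Int) + i, l[i]), (PySem.List.mem_enumerate_iff _ _ _).mpr ⟨i, h, rfl⟩, by simpa using hdash, by simp⟩


theorem pred_iff {lr lg : List Char} (w : List (List Char)) :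
    ((lr ∈ w ∨ lg ∈ w) ∨ ∃ t ∈ w, ((t ++ ['-']) <+: lr ∨ lr = t) ∨ ((t ++ ['-']) <+: lg ∨ lg = t))
      ↔ ∃ k, ((k = lr ∨ (k ++ ['-']) <+: lr) ∨ (k = lg ∨ (k ++ ['-']) <+: lg)) ∧ k ∈ w := by
  constructor
  · rintro ((h | h) | ⟨t, ht, (h | rfl) | (h | rfl)⟩)
    · exact ⟨lr, Or.inl (Or.inl rfl), h⟩
    · exact ⟨lg, Or.inr (Or.inl rfl), h⟩
    · exact ⟨t, Or.inl (Or.inr h), ht⟩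
    · exact ⟨lr, Or.inl (Or.inl rfl), ht⟩
    · exact ⟨t, Or.inr (Or.inr h), ht⟩
    · exact ⟨lg, Or.inr (Or.inl rfl), ht⟩
  · rintro ⟨k, (rfl | h) | (rfl | h), hk⟩
    · exact Or.inl (Or.inl hk)
    · exact Or.inr ⟨k, hk, Or.inl (Or.inl h)⟩
    · exact Or.inl (Or.inr hk)
    · exact Or.inr ⟨k, hk, Or.inr (Or.inl h)⟩

-- the two per-subtitle decisions agree
theorem pred_eq (wanted : PySem.Set (List Char)) (s : List (String × String)) :
    ((if PySem.Set.contains wanted (pvNormLang s "language_resolved")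
          || PySem.Set.contains wanted (pvNormLang s "language") then true
      else pvLoopA wanted (pvNormLang s "language_resolved") (pvNormLang s "language")))
      = pvWantsB wanted s := by
  rw [Bool.eq_iff_iff]
  simp only [pvWantsB, pvLoopA_eq_any, PySem.Set.contains, List.any_eq_true,
    List.contains_iff_mem, Bool.or_eq_true, PySem.Chars.startswith_iff, beq_iff_eq,
    PySem.Set.mem_union, mem_pvKeysB, Bool.if_true_left, decide_eq_true_eq]
  exact pred_iff wanted

-- ===== VERDICT (by name: the statement is the Claim_ definition above) =====
theorem filter_subtitles_py_spec : Claim_equal_filter_subtitles_py := by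
  intro sub_list filter_str _
  unfold Spec_filter_subtitles_py filter_subtitles_py filter_subtitles_py_alt
  split_ifs with h1 h2 h3 <;> try rfl
  have hbody :
      (fun (acc : List (List (String × String))) s =>
        if PySem.Set.contains (pvWanted filter_str.toList) (pvNormLang s "language_resolved")
            || PySem.Set.contains (pvWanted filter_str.toList) (pvNormLang s "language") then acc ++ [s]
        else if pvLoopA (pvWanted filter_str.toList) (pvNormLang s "language_resolved") (pvNormLang s "language") then acc ++ [s]
        else acc)
      = (fun acc s => if pvWantsB (pvWanted filter_str.toList) s then acc ++ [s] else acc) := by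
    funext acc s
    rw [← pred_eq]
    split_ifs <;> simp_all
  simp only [hbody]
  split_ifs with hw
  · rfl
  · simpa using PySem.List.foldl_append_if (fun s => pvWantsB (pvWanted filter_str.toList) s)
      (fun x : List (String × String) => x) sub_list []
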